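-- pv_equiv track=rewrite | github.com/SabaKathawala/Assignment3_ML | MS-GSP.py | supportCalculation
-- ===== SOURCE A (Python) =====
-- def checkSubset(value, transaction, index, count):
--     if transaction:
--         for i, each in enumerate(transaction):
--
--             if set(value[index]).issubset(set(each)):
--                 count += 1
--                 if index != len(value) - 1:
--                     index += 1
--                     # if count == len(value):
--                     #     return True
--                     checkSubset(value, transaction[i + 1:], index, count)
--
--         if count >= len(value):
--             return True
--     return False
--
-- def supportCalculation(S, C, index, count):
--     countArray = []
--     for j, value in enumerate(C):
--         count = 0
--         for transaction in S:
--             subsetCount = checkSubset(value, transaction, index=0, count=0)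
--             if subsetCount:
--                 count += 1
--         # Trim
--         countArray.append(count)
--     return countArray
-- ===== SOURCE B (Python) =====
-- def _supports(value, transaction):
--     if not transaction:
--         return False
--     p = 0
--     c = 0
--     last = len(value) - 1
--     for itemset in transaction:
--         if set(value[p]).issubset(itemset):
--             c += 1
--             if p != last:
--                 p += 1
--     return c >= len(value)
--
-- def supportCalculation(S, C, index, count):
--     return [sum(1 for transaction in S if _supports(value, transaction)) for value in C]
-- ===== Notes on version B (the rewrite author's own statement) =====
-- stated objective: faster
-- what changed: Replaces A's recursive checkSubset, whose recursive call over each suffix is made and discarded (dead work that can blow up exponentially with the number of matches), by a single iterative greedy capped-pointer scan per (candidate, transaction), counting supporting transactions per candidate in order.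
-- outside the precondition, e.g. on supportCalculation([[[1]]], [[]], 0, 0): A raises IndexError, B raises IndexError
import Mathlib
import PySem

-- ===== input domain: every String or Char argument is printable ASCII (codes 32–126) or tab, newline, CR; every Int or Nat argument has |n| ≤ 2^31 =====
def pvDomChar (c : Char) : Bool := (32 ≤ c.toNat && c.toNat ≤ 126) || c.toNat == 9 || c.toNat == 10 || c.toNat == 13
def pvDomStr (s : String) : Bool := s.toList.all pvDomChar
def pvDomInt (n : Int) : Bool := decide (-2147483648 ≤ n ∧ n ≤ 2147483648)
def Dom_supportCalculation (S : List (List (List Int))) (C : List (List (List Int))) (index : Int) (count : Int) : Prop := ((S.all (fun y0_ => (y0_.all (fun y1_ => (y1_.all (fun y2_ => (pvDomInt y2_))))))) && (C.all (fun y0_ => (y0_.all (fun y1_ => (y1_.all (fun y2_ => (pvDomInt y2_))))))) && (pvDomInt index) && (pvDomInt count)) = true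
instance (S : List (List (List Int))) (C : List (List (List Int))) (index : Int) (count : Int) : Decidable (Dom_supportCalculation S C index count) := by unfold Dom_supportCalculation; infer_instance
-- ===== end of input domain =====

-- B replaces A's recursive checkSubset (whose recursive call's result is discarded, doing
-- exponential dead work) by one iterative greedy capped-pointer scan per transaction: faster.

-- ===== PORT A =====
-- set(value[index]).issubset(set(each)); value[index] excluded from being out of range by Pre_
def pvSubsetA (value : List (List Int)) (index : Int) (each : List Int) : Bool :=
  (PySem.List.pyGetD value index []).all (fun x => each.contains x)

mutual
-- the for-loop of checkSubset: rest is the not-yet-visited suffix of transaction,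
-- so 'tl' at each step is exactly Python's transaction[i+1:]
def csLoop (value : List (List Int)) (rest : List (List Int)) (index count : Int) :
    Int × Int :=
  match rest with
  | [] => (index, count)
  | each :: tl =>
    if pvSubsetA value index each then
      let count' := count + 1
      if index ≠ (value.length : Int) - 1 then
        let index' := index + 1
        let _ := checkSubset value tl index' count'  -- Python makes this call and discards it
        csLoop value tl index' count'
      else
        csLoop value tl index count'
    else
      csLoop value tl index count
termination_by rest.length * 2 + 1
decreasing_by all_goals (simp only [List.length_cons]; omega)

def checkSubset (value : List (List Int)) (transaction : List (List Int))
    (index count : Int) : Bool :=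
  if transaction = [] then
    false
  else
    let r := csLoop value transaction index count
    decide ((value.length : Int) ≤ r.2)
termination_by transaction.length * 2 + 2
decreasing_by omega
end

def supportCalculation (S : List (List (List Int))) (C : List (List (List Int))) (index : Int) (count : Int) : List Int :=
  C.foldl (fun countArray value =>
    countArray ++ [S.foldl (fun count transaction =>
      if checkSubset value transaction 0 0 then count + 1 else count) 0]) []

-- ===== PORT B =====
-- the single greedy scan of _supports: p capped at len(value)-1, c counts matches
def altScan (value : List (List Int)) (last : Int) (rest : List (List Int))
    (p c : Int) : Int :=
  match rest with
  | [] => c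
  | itemset :: tl =>
    if (PySem.List.pyGetD value p []).all (fun x => itemset.contains x) then
      altScan value last tl (if p ≠ last then p + 1 else p) (c + 1)
    else
      altScan value last tl p c

def altSupports (value : List (List Int)) (transaction : List (List Int)) : Bool :=
  if transaction = [] then false
  else decide ((value.length : Int) ≤ altScan value ((value.length : Int) - 1) transaction 0 0)

def supportCalculation_alt (S : List (List (List Int))) (C : List (List (List Int))) (index : Int) (count : Int) : List Int :=
  C.map (fun value => (S.countP (fun transaction => altSupports value transaction) : Int))

-- ===== PRECONDITION & SPEC =====
-- Pre_ excludes exactly the inputs where Python raises IndexError: an empty candidate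
-- sequence in C together with a non-empty transaction in S (value[0] / value[p] fails).
def Pre_supportCalculation (S : List (List (List Int))) (C : List (List (List Int))) (index : Int) (count : Int) : Prop :=
  [] ∈ C → ∀ t ∈ S, t = []
instance (S : List (List (List Int))) (C : List (List (List Int))) (index : Int) (count : Int) : Decidable (Pre_supportCalculation S C index count) := by unfold Pre_supportCalculation; infer_instance

def pvWitness_supportCalculation : List (List (List Int)) × List (List (List Int)) × Int × Int :=
  ([[[1], [2]], [[2, 3]]], [[[1], [2]], [[3]]], 0, 0)

def Spec_supportCalculation (S : List (List (List Int))) (C : List (List (List Int))) (index : Int) (count : Int) (out : List Int) : Prop := out = supportCalculation_alt S C index count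
instance (S : List (List (List Int))) (C : List (List (List Int))) (index : Int) (count : Int) (out : List Int) : Decidable (Spec_supportCalculation S C index count out) := by unfold Spec_supportCalculation; infer_instance

-- ===== CLAIM (what is proved, stated in full; the proofs are below) =====
def Claim_equal_supportCalculation : Prop := ∀ (S : List (List (List Int))) (C : List (List (List Int))) (index : Int) (count : Int), Dom_supportCalculation S C index count → Pre_supportCalculation S C index count → Spec_supportCalculation S C index count (supportCalculation S C index count)

-- ===== LEMMAS AND PROOFS =====

-- the two loops run the same (index, count) state machine; the dead call vanishes
theorem csLoop_eq_altScan (value rest : List (List Int)) (index count : Int) :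
    (csLoop value rest index count).2
      = altScan value ((value.length : Int) - 1) rest index count := by
  induction rest generalizing index count with
  | nil => simp [csLoop, altScan]
  | cons each tl ih =>
    simp only [csLoop, altScan, pvSubsetA]
    split_ifs with h1 h2 <;> simp [ih]

theorem checkSubset_eq_altSupports (value transaction : List (List Int)) :
    checkSubset value transaction 0 0 = altSupports value transaction := by
  by_cases h : transaction = []
  · simp [checkSubset, altSupports, h]
  · simp [checkSubset, altSupports, h, csLoop_eq_altScan]

theorem foldl_count_eq_countP (p : List (List Int) → Bool) (S : List (List (List Int)))
    (acc : Int) :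
    S.foldl (fun count transaction => if p transaction then count + 1 else count) acc
      = acc + (S.countP p : Int) := by
  induction S generalizing acc with
  | nil => simp
  | cons t S ih =>
    by_cases h : p t
    · simp [List.countP_cons, h, ih]; ring
    · simp [List.countP_cons, h, ih]

theorem foldl_append_map (C : List (List (List Int))) (f : List (List Int) → Int)
    (acc : List Int) :
    C.foldl (fun arr value => arr ++ [f value]) acc = acc ++ C.map f := by
  induction C generalizing acc with
  | nil => simp
  | cons v C ih => simp [ih]

-- ===== VERDICT (by name: the statement is the Claim_ definition above) =====
theorem supportCalculation_spec : Claim_equal_supportCalculation := by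
  intro S C index count _ _
  unfold Spec_supportCalculation supportCalculation supportCalculation_alt
  rw [foldl_append_map C
    (fun value => S.foldl (fun count transaction =>
      if checkSubset value transaction 0 0 then count + 1 else count) 0) []]
  simp only [List.nil_append]
  apply List.map_congr_left
  intro value _
  rw [foldl_count_eq_countP (fun t => checkSubset value t 0 0) S 0]
  simp only [zero_add, Int.natCast_inj]
  exact List.countP_congr (fun t _ => by rw [checkSubset_eq_altSupports])
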